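-- pv_equiv track=rewrite | github.com/sanyalsunny111/Analyzing_Reddit_trolls_using_machine_learning_and_networkscience | Step4_wordcount.py | remsym
-- ===== SOURCE A (Python) =====
-- def remsym(vec):
--
--     j=0
--     str1 = " "
--     for i in range(len(vec)):
--         if vec[i] == "@" or vec[i] == ";" :
--             j=1
--         if vec[i] == " ":
--             j=0
--         if j==1:
--             str1 += " "
--         else:
--             str1 += vec[i]
--     return str1
-- ===== SOURCE B (Python) =====
-- def remsym(vec):
--     parts = [" "]
--     i = 0
--     n = len(vec)
--     while i < n:
--         c = vec[i]
--         if c == "@" or c == ";":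
--             j = vec.find(" ", i)
--             if j == -1:
--                 j = n
--             parts.append(" " * (j - i))
--             i = j
--         else:
--             parts.append(c)
--             i += 1
--     return "".join(parts)
-- ===== Notes on version B (the rewrite author's own statement) =====
-- stated objective: alternative
-- what changed: Replaces A's per-character flag automaton (j toggled by @/;/space on every char) with a skip-ahead scan: on seeing @ or ; it jumps with find(' ') to the end of the run and appends the whole space mask at once; ordinary chars are copied directly with no flag state.
import Mathlib
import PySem

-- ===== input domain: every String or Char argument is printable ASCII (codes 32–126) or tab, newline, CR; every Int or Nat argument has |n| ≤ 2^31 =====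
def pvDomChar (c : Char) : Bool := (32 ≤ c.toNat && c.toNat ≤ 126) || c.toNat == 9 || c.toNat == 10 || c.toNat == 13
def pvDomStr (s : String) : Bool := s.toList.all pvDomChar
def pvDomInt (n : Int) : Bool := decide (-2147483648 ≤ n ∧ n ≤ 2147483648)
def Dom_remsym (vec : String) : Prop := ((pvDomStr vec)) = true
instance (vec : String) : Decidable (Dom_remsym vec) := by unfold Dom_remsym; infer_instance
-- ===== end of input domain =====

-- B replaces A's per-character flag automaton by a skip-ahead scan: on @/; it jumps to
-- the next space and emits the whole space mask at once (objective: alternative).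

-- ===== PORT A =====
-- A's for-loop over i in range(len(vec)) reads vec[i] in order; ported as the
-- structural recursion over vec.toList carrying the same state (j, str1).
def remsymA_go : List Char → Int → String → String
  | [], _, s => s
  | c :: rest, j, s =>
    let j1 : Int := if c = '@' ∨ c = ';' then 1 else j
    let j2 : Int := if c = ' ' then 0 else j1
    let s' : String := if j2 = 1 then s ++ " " else s.push c
    remsymA_go rest j2 s'

def remsym (vec : String) : String := remsymA_go vec.toList 0 " "

-- ===== PORT B =====
-- B's while-loop over the suffix from i; the 'vec.find(" ", i)' scan is the
-- takeWhile/dropWhile split of the suffix, and '" " * (j - i)' is the replicate.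
def remsymB_go : List Char → List Char
  | [] => []
  | c :: t =>
    if c = '@' ∨ c = ';' then
      let run := t.takeWhile (· ≠ ' ')
      let rest := t.dropWhile (· ≠ ' ')
      ' ' :: (List.replicate run.length ' ' ++ remsymB_go rest)
    else c :: remsymB_go t
termination_by l => l.length
decreasing_by
  · exact Nat.lt_succ_of_le (List.length_dropWhile_le _ _)
  · exact Nat.lt_succ_of_le (Nat.le_refl _)

def remsym_alt (vec : String) : String := " " ++ String.ofList (remsymB_go vec.toList)

-- ===== PRECONDITION & SPEC =====
def Spec_remsym (vec : String) (out : String) : Prop := out = remsym_alt vec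
instance (vec : String) (out : String) : Decidable (Spec_remsym vec out) := by unfold Spec_remsym; infer_instance

-- ===== CLAIM (what is proved, stated in full; the proofs are below) =====
def Claim_equal_remsym : Prop := ∀ (vec : String), Dom_remsym vec → Spec_remsym vec (remsym vec)

-- ===== LEMMAS AND PROOFS =====

-- what A produces from the masked state (j = 1): spaces until (and including) the next space
def maskB (l : List Char) : List Char :=
  List.replicate (l.takeWhile (· ≠ ' ')).length ' ' ++ remsymB_go (l.dropWhile (· ≠ ' '))

theorem remsymB_go_symbol (c : Char) (t : List Char) (h : c = '@' ∨ c = ';') :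
    remsymB_go (c :: t) = ' ' :: maskB t := by
  rw [remsymB_go, if_pos h, maskB]

theorem remsymB_go_other (c : Char) (t : List Char) (h : ¬(c = '@' ∨ c = ';')) :
    remsymB_go (c :: t) = c :: remsymB_go t := by
  rw [remsymB_go, if_neg h]

theorem maskB_space (t : List Char) : maskB (' ' :: t) = ' ' :: remsymB_go t := by
  have h : ¬(' ' = '@' ∨ ' ' = ';') := by decide
  simp [maskB, List.takeWhile, List.dropWhile, remsymB_go_other _ _ h]

theorem maskB_nonspace (c : Char) (t : List Char) (h : ¬ c = ' ') :
    maskB (c :: t) = ' ' :: maskB t := by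
  simp [maskB, List.takeWhile, List.dropWhile, h, List.replicate_succ]

theorem remsymA_go_eq (l : List Char) : ∀ (j : Int) (s : String),
    remsymA_go l j s = s ++ String.ofList (if j = 1 then maskB l else remsymB_go l) := by
  induction l with
  | nil =>
    intro j s
    rw [← String.toList_inj]
    split <;> simp [remsymA_go, maskB, remsymB_go]
  | cons c t ih =>
    intro j s
    by_cases hsym : c = '@' ∨ c = ';'
    · -- symbol: j2 = 1, append " "
      have hsp : ¬ c = ' ' := by rcases hsym with h | h <;> simp [h]
      rw [remsymA_go]
      simp only [hsym, if_pos, hsp, if_neg, not_false_iff]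
      rw [ih 1 (s ++ " ")]
      by_cases hj : j = 1
      · rw [if_pos rfl, if_pos hj, maskB_nonspace c t hsp]
        rw [← String.toList_inj]; simp
      · rw [if_pos rfl, if_neg hj, remsymB_go_symbol c t hsym]
        rw [← String.toList_inj]; simp
    · by_cases hsp : c = ' '
      · -- space: j2 = 0, append c (= ' ')
        subst hsp
        rw [remsymA_go]
        simp only [hsym, if_neg, not_false_iff, if_pos]
        have h01 : (0 : Int) ≠ 1 := by decide
        rw [if_neg h01, ih 0 (s.push ' '), if_neg h01]
        by_cases hj : j = 1
        · rw [if_pos hj, maskB_space]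
          rw [← String.toList_inj]; simp
        · rw [if_neg hj, remsymB_go_other _ _ (by decide)]
          rw [← String.toList_inj]; simp
      · -- neither symbol nor space: j unchanged
        rw [remsymA_go]
        simp only [hsym, if_neg, not_false_iff, hsp]
        by_cases hj : j = 1
        · rw [if_pos (by simp [hj]), ih j (s ++ " "), if_pos hj, if_pos hj,
            maskB_nonspace c t hsp]
          rw [← String.toList_inj]; simp
        · rw [if_neg (by simp [hj]), ih j (s.push c), if_neg hj, if_neg hj,
            remsymB_go_other c t hsym]
          rw [← String.toList_inj]; simp

-- ===== VERDICT (by name: the statement is the Claim_ definition above) =====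
theorem remsym_spec : Claim_equal_remsym := by
  intro vec _
  unfold Spec_remsym remsym remsym_alt
  rw [remsymA_go_eq vec.toList 0 " ", if_neg (by decide)]
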